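-- pv_equiv track=rewrite | github.com/Jerry-Tao777/mosaic | Code/photomosaic.py | getBestMatchIndex
-- ===== SOURCE A (Python) =====
-- def getBestMatchIndex(input_avg, avgs):
--     """
--     找出颜色值最接近的索引
--     把颜色值看做三维空间里的一个点，依次计算目标点跟列表里每个点在三维空间里的距离，从而得到距
--     离最近的那个点的索引。
--     @param {Tuple[int, int, int]} input_avg 目标颜色值
--     @param {List[Tuple[int, int, int]]} avgs 要搜索的颜色值列表
--     @return {int} 命中元素的索引
--     """
--     index = 0
--     min_index = 0
--     min_dist = float("inf")
--     for val in avgs: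
--         # 三维空间两点距离计算公式:
--         # (x1 - x2)**2 + (y1 - y2)**2  + (z1 - z2)**2
--         # 因为这里只需要比较大小，所以不需要平方根
--         dist = ((val[0] - input_avg[0]) ** 2 + (val[1] - input_avg[1]) ** 2 +
--                 (val[2] - input_avg[2]) ** 2)
--         if dist < min_dist:
--             min_dist = dist
--             min_index = index
--         index += 1
--     return min_index
-- ===== SOURCE B (Python) =====
-- def getBestMatchIndex(input_avg, avgs):
--     """Two-pass version: materialize all squared distances, then take the
--     first index of the minimum.  Returns 0 for an empty list, like A."""
--     if not avgs:
--         return 0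
--     dists = [(v[0] - input_avg[0]) ** 2 + (v[1] - input_avg[1]) ** 2 +
--              (v[2] - input_avg[2]) ** 2 for v in avgs]
--     return dists.index(min(dists))
-- ===== Notes on version B (the rewrite author's own statement) =====
-- stated objective: alternative
-- what changed: Replaces the single running-minimum loop with index counter by a materialized distance table followed by min() and a separate first-occurrence index() lookup (empty list still yields 0).
import Mathlib
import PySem

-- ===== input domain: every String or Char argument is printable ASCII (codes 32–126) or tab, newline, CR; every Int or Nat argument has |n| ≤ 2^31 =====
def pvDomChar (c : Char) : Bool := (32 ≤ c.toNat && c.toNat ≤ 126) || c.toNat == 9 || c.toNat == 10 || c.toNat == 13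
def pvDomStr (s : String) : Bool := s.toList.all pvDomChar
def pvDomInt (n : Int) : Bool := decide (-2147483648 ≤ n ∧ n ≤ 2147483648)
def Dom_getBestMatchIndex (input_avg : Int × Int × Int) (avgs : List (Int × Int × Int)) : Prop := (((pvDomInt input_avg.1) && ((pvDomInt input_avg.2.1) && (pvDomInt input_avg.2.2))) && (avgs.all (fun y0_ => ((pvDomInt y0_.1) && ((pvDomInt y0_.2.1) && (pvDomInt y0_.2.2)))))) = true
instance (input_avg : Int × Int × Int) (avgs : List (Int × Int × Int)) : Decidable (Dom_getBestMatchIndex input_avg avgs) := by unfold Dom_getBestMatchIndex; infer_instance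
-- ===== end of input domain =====

-- B replaces A's running-minimum scan by a materialized distance table followed by
-- min() and a first-occurrence index() lookup (alternative decomposition, same cost).

-- ===== PORT A =====
-- A's loop: state (index, min_index, min_dist); min_dist = none models float("inf")
-- (every finite dist compares < inf, exactly as the first iteration's dist < inf does).
def getBestMatchIndex (input_avg : Int × Int × Int) (avgs : List (Int × Int × Int)) : Int :=
  let s := avgs.foldl
    (fun (st : Int × Int × Option Int) val =>
      let dist := (val.1 - input_avg.1) ^ 2 + (val.2.1 - input_avg.2.1) ^ 2 +
                  (val.2.2 - input_avg.2.2) ^ 2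
      match st.2.2 with
      | none => (st.1 + 1, st.1, some dist)          -- dist < inf: always update
      | some m => if dist < m then (st.1 + 1, st.1, some dist)
                  else (st.1 + 1, st.2.1, some m))
    (0, 0, none)
  s.2.1

-- ===== PORT B =====
def getBestMatchIndex_alt (input_avg : Int × Int × Int) (avgs : List (Int × Int × Int)) : Int :=
  if avgs = [] then 0
  else
    let dists := avgs.map (fun v =>
      (v.1 - input_avg.1) ^ 2 + (v.2.1 - input_avg.2.1) ^ 2 +
      (v.2.2 - input_avg.2.2) ^ 2)
    match PySem.List.min? dists (fun x => x) with
    | some m => ((PySem.List.index? dists m).getD 0 : Nat)  -- index() always succeeds: min ∈ dists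
    | none => 0                                             -- unreachable: dists ≠ []

-- ===== PRECONDITION & SPEC =====
def Spec_getBestMatchIndex (input_avg : Int × Int × Int) (avgs : List (Int × Int × Int)) (out : Int) : Prop := out = getBestMatchIndex_alt input_avg avgs
instance (input_avg : Int × Int × Int) (avgs : List (Int × Int × Int)) (out : Int) : Decidable (Spec_getBestMatchIndex input_avg avgs out) := by unfold Spec_getBestMatchIndex; infer_instance

-- ===== CLAIM (what is proved, stated in full; the proofs are below) =====
def Claim_equal_getBestMatchIndex : Prop := ∀ (input_avg : Int × Int × Int) (avgs : List (Int × Int × Int)), Dom_getBestMatchIndex input_avg avgs → Spec_getBestMatchIndex input_avg avgs (getBestMatchIndex input_avg avgs)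

-- ===== LEMMAS AND PROOFS =====

-- the step of A's loop, abstracted over the already-computed distance
def pvStep (st : Int × Int × Option Int) (d : Int) : Int × Int × Option Int :=
  match st.2.2 with
  | none => (st.1 + 1, st.1, some d)
  | some m => if d < m then (st.1 + 1, st.1, some d) else (st.1 + 1, st.2.1, some m)

-- foldl min computes the minimum of the list together with the accumulator
theorem pv_foldl_min (t : List Int) : ∀ (a : Int),
    t.foldl min a = (PySem.List.min? t (fun x => x)).elim a (fun μ => min a μ) := by
  induction t with
  | nil =>
      intro a
      rw [(PySem.List.min?_eq_none_iff [] (fun x => x)).2 rfl]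
      rfl
  | cons x t ih =>
      intro a
      rw [List.foldl_cons, PySem.List.min?_id_cons, ih (min a x), ih x, Option.elim_some]
      cases h : PySem.List.min? t (fun x => x) with
      | none => simp
      | some μ => simp [min_assoc]

-- the running strict-minimum loop lands on the first index of the minimum
theorem pv_key (t : List Int) : ∀ (i mi m : Int),
    (t.foldl pvStep (i, mi, some m)).2.1 =
      (PySem.List.min? t (fun x => x)).elim mi
        (fun μ => if μ < m then i + ((PySem.List.index? t μ).getD 0 : Nat) else mi) := by
  induction t with
  | nil =>
      intro i mi m
      rw [(PySem.List.min?_eq_none_iff [] (fun x => x)).2 rfl]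
      rfl
  | cons d t ih =>
      intro i mi m
      have hstep : pvStep (i, mi, some m) d
          = if d < m then (i + 1, i, some d) else (i + 1, mi, some m) := rfl
      rw [List.foldl_cons, hstep, PySem.List.min?_id_cons, Option.elim_some,
          pv_foldl_min t d]
      cases h : PySem.List.min? t (fun x => x) with
      | none =>
          have ht : t = [] := (PySem.List.min?_eq_none_iff t (fun x => x)).1 h
          subst ht
          rw [Option.elim_none]
          by_cases hdm : d < m
          · rw [if_pos hdm, if_pos hdm, PySem.List.index?_cons_self]
            simp
          · rw [if_neg hdm, if_neg hdm]
            rfl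
      | some μ =>
          rw [Option.elim_some]
          have hμmem : μ ∈ t := PySem.List.min?_mem h
          rcases Option.isSome_iff_exists.1
            ((PySem.List.index?_isSome_iff t μ).2 hμmem) with ⟨k, hk⟩
          by_cases hdm : d < m
          · rw [if_pos hdm, ih (i + 1) i d, h, Option.elim_some]
            by_cases hμd : μ < d
            · have hmd : min d μ = μ := by omega
              have hne : d ≠ μ := by omega
              have hlt : μ < m := by omega
              rw [hmd, if_pos hμd, if_pos hlt,
                  PySem.List.index?_cons_of_ne (x := d) (xs := t) (v := μ) hne, hk,
                  Option.map_some, Option.getD_some, Option.getD_some]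
              push_cast; ring
            · have hmd : min d μ = d := by omega
              rw [hmd, if_neg hμd, if_pos hdm, PySem.List.index?_cons_self]
              simp
          · rw [if_neg hdm, ih (i + 1) mi m, h, Option.elim_some]
            by_cases hμd : μ < d
            · have hmd : min d μ = μ := by omega
              have hne : d ≠ μ := by omega
              rw [hmd, PySem.List.index?_cons_of_ne (x := d) (xs := t) (v := μ) hne, hk]
              by_cases hμm : μ < m
              · rw [if_pos hμm, if_pos hμm, Option.getD_some, Option.map_some,
                    Option.getD_some]
                push_cast; ring
              · rw [if_neg hμm, if_neg hμm]
            · have hmd : min d μ = d := by omega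
              have hμm : ¬ μ < m := by omega
              rw [hmd, if_neg hμm, if_neg hdm]

-- ===== VERDICT (by name: the statement is the Claim_ definition above) =====
theorem getBestMatchIndex_spec : Claim_equal_getBestMatchIndex := by
  intro ia avgs _
  unfold Spec_getBestMatchIndex
  cases avgs with
  | nil => rfl
  | cons a rest =>
      set f : (Int × Int × Int) → Int := fun v =>
        (v.1 - ia.1) ^ 2 + (v.2.1 - ia.2.1) ^ 2 + (v.2.2 - ia.2.2) ^ 2 with hf
      set c : Int := (rest.map f).foldl min (f a) with hc
      -- B's side: the guard is dead, min() is the running fold, index() looks it up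
      have hB : getBestMatchIndex_alt ia (a :: rest)
          = ((PySem.List.index? (f a :: rest.map f) c).getD 0 : Nat) := by
        unfold getBestMatchIndex_alt
        rw [if_neg (List.cons_ne_nil a rest)]
        show (match PySem.List.min? (f a :: rest.map f) (fun x => x) with
              | some m => (((PySem.List.index? (f a :: rest.map f) m).getD 0 : Nat) : Int)
              | none => (0 : Int))
            = (((PySem.List.index? (f a :: rest.map f) c).getD 0 : Nat) : Int)
        rw [PySem.List.min?_id_cons, ← hc]
      -- A's side: the loop is pvStep folded over the mapped distances
      have hA : getBestMatchIndex ia (a :: rest)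
          = (((rest.map f)).foldl pvStep (1, 0, some (f a))).2.1 := by
        unfold getBestMatchIndex
        have h1 : ((a :: rest).foldl
            (fun (st : Int × Int × Option Int) val =>
              let dist := (val.1 - ia.1) ^ 2 + (val.2.1 - ia.2.1) ^ 2 +
                          (val.2.2 - ia.2.2) ^ 2
              match st.2.2 with
              | none => (st.1 + 1, st.1, some dist)
              | some m => if dist < m then (st.1 + 1, st.1, some dist)
                          else (st.1 + 1, st.2.1, some m))
            ((0 : Int), (0 : Int), (none : Option Int)))
            = (((a :: rest).map f).foldl pvStep (0, 0, none)) := by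
          rw [List.foldl_map]; rfl
        simp only [h1]
        rfl
      rw [hA, hB, pv_key (rest.map f) 1 0 (f a)]
      cases h : PySem.List.min? (rest.map f) (fun x => x) with
      | none =>
          have ht : rest.map f = [] := (PySem.List.min?_eq_none_iff (rest.map f) (fun x => x)).1 h
          have hcv : c = f a := by rw [hc, ht]; rfl
          rw [Option.elim_none, ht, hcv, PySem.List.index?_cons_self]
          rfl
      | some μ =>
          rw [Option.elim_some]
          have hcv : c = min (f a) μ := by
            rw [hc, pv_foldl_min (rest.map f) (f a), h, Option.elim_some]
          have hμmem : μ ∈ rest.map f := PySem.List.min?_mem h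
          rcases Option.isSome_iff_exists.1
            ((PySem.List.index?_isSome_iff (rest.map f) μ).2 hμmem) with ⟨k, hk⟩
          by_cases hμd : μ < f a
          · have hmd : c = μ := by omega
            have hne : f a ≠ μ := by omega
            rw [if_pos hμd, hmd,
                PySem.List.index?_cons_of_ne (x := f a) (xs := rest.map f) (v := μ) hne,
                hk, Option.map_some, Option.getD_some, Option.getD_some]
            push_cast; ring
          · have hmd : c = f a := by omega
            rw [if_neg hμd, hmd, PySem.List.index?_cons_self]
            rfl
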